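-- pv_equiv track=rewrite | github.com/LimPark996/Metal-Defect-Synthesis | src/metal_defect_synthesis/utils/image.py | get_mask_preset
-- ===== SOURCE A (Python) =====
-- from typing import List, Tuple
--
-- def get_mask_preset(preset_name: str) -> List[int]:
--     """마스크 프리셋 반환"""
--     presets = {
--         "center_small": [],
--         "center_large": [],
--         "top_left": [],
--         "bottom_right": []
--     }
--
--     for y in range(5, 11):
--         for x in range(5, 11):
--             presets["center_small"].append(y * 16 + x)
--
--     for y in range(4, 12):
--         for x in range(4, 12):
--             presets["center_large"].append(y * 16 + x)
--
--     for y in range(0, 6):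
--         for x in range(0, 6):
--             presets["top_left"].append(y * 16 + x)
--
--     for y in range(10, 16):
--         for x in range(10, 16):
--             presets["bottom_right"].append(y * 16 + x)
--
--     return presets.get(preset_name, presets["center_small"])
-- ===== SOURCE B (Python) =====
-- from typing import List, Tuple
--
-- def get_mask_preset(preset_name: str) -> List[int]:
--     """마스크 프리셋 반환"""
--     table = {
--         "center_small": (5, 11, 5, 11),
--         "center_large": (4, 12, 4, 12),
--         "top_left": (0, 6, 0, 6),
--         "bottom_right": (10, 16, 10, 16),
--     }
--     ys, ye, xs, xe = table.get(preset_name, table["center_small"])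
--     return [i for i in range(256) if ys <= i // 16 < ye and xs <= i % 16 < xe]
-- ===== Notes on version B (the rewrite author's own statement) =====
-- stated objective: alternative
-- what changed: A generates coordinates with four pairs of nested y/x loops appending y*16+x into dicts for every preset; B never forms y*16+x at all: it looks up the requested preset's rectangle bounds and filters the flat cell indices 0..255, keeping i exactly when i//16 and i%16 fall inside the rectangle.
import Mathlib
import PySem

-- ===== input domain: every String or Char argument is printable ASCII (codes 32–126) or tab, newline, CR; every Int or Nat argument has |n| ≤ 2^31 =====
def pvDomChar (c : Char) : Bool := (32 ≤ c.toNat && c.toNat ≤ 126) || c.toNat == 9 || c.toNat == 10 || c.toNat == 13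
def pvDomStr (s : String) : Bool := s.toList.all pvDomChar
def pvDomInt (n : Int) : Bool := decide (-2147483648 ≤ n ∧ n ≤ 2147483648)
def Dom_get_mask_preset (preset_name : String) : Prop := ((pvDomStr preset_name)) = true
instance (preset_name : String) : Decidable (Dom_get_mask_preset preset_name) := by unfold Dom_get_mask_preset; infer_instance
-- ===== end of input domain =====

set_option maxRecDepth 8192


-- B replaces A's nested y/x generation of y*16+x into dicts for all four presets by a
-- bounds lookup plus one filter over the flat indices 0..255 using a div/mod membership
-- test (alternative decomposition, same cost).

-- ===== PORT A =====
-- the dict of all four presets that A builds (input-independent, hence a helper def)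
def presetsA : PySem.Dict String (List Int) :=
  let presets : PySem.Dict String (List Int) :=
    PySem.Dict.ofList [("center_small", []), ("center_large", []), ("top_left", []), ("bottom_right", [])]
  let presets := (PySem.List.pyRange 5 11 1).foldl (fun d y =>
    (PySem.List.pyRange 5 11 1).foldl (fun d x =>
      d.modify "center_small" [] (fun l => l ++ [y * 16 + x])) d) presets
  let presets := (PySem.List.pyRange 4 12 1).foldl (fun d y =>
    (PySem.List.pyRange 4 12 1).foldl (fun d x =>
      d.modify "center_large" [] (fun l => l ++ [y * 16 + x])) d) presets
  let presets := (PySem.List.pyRange 0 6 1).foldl (fun d y =>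
    (PySem.List.pyRange 0 6 1).foldl (fun d x =>
      d.modify "top_left" [] (fun l => l ++ [y * 16 + x])) d) presets
  (PySem.List.pyRange 10 16 1).foldl (fun d y =>
    (PySem.List.pyRange 10 16 1).foldl (fun d x =>
      d.modify "bottom_right" [] (fun l => l ++ [y * 16 + x])) d) presets

def get_mask_preset (preset_name : String) : List Int :=
  presetsA.getD preset_name (presetsA.getD "center_small" [])

-- ===== PORT B =====
def tableB : PySem.Dict String (Int × Int × Int × Int) :=
  PySem.Dict.ofList [("center_small", (5, 11, 5, 11)), ("center_large", (4, 12, 4, 12)),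
                     ("top_left", (0, 6, 0, 6)), ("bottom_right", (10, 16, 10, 16))]

def get_mask_preset_alt (preset_name : String) : List Int :=
  match tableB.getD preset_name (tableB.getD "center_small" (0, 0, 0, 0)) with
  | (ys, ye, xs, xe) =>
    (PySem.List.pyRange 0 256 1).filter (fun i =>
      (decide (ys ≤ PySem.Int.floordiv i 16) && decide (PySem.Int.floordiv i 16 < ye)) &&
      (decide (xs ≤ PySem.Int.mod i 16) && decide (PySem.Int.mod i 16 < xe)))

-- ===== PRECONDITION & SPEC =====
def Spec_get_mask_preset (preset_name : String) (out : List Int) : Prop := out = get_mask_preset_alt preset_name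
instance (preset_name : String) (out : List Int) : Decidable (Spec_get_mask_preset preset_name out) := by unfold Spec_get_mask_preset; infer_instance

-- ===== CLAIM (what is proved, stated in full; the proofs are below) =====
def Claim_equal_get_mask_preset : Prop := ∀ (preset_name : String), Dom_get_mask_preset preset_name → Spec_get_mask_preset preset_name (get_mask_preset preset_name)

-- ===== LEMMAS AND PROOFS =====

theorem keysA : presetsA.keys = ["center_small", "center_large", "top_left", "bottom_right"] := by decide

theorem keysB : tableB.keys = ["center_small", "center_large", "top_left", "bottom_right"] := by decide

-- ===== VERDICT (by name: the statement is the Claim_ definition above) =====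
theorem get_mask_preset_spec : Claim_equal_get_mask_preset := by
  intro s _
  unfold Spec_get_mask_preset
  by_cases h1 : s = "center_small"; · subst h1; decide
  by_cases h2 : s = "center_large"; · subst h2; decide
  by_cases h3 : s = "top_left"; · subst h3; decide
  by_cases h4 : s = "bottom_right"; · subst h4; decide
  have hmem : s ∉ (["center_small", "center_large", "top_left", "bottom_right"] : List String) := by
    simp [h1, h2, h3, h4]
  have hA : presetsA.get? s = none :=
    (PySem.Dict.get?_eq_none_iff_not_mem_keys _ _).mpr (keysA ▸ hmem)
  have hB : tableB.get? s = none :=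
    (PySem.Dict.get?_eq_none_iff_not_mem_keys _ _).mpr (keysB ▸ hmem)
  simp only [get_mask_preset, get_mask_preset_alt,
    PySem.Dict.getD_eq_get?_getD, hA, hB, Option.getD_none]
  decide
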